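-- pv_equiv track=rewrite | github.com/rhellwege/bytepair | bytepair.py | get_terminals
-- ===== SOURCE A (Python) =====
-- def get_terminals(grammar, token, mem):
--     if grammar[token][0] == token:
--         mem[token] = [token]
--         return [token]
--     else:
--         if token in mem:
--             return mem[token]
--         s = get_terminals(grammar, grammar[token][0], mem) + get_terminals(grammar, grammar[token][1], mem)
--         mem[token] = s
--         return s
-- ===== SOURCE B (Python) =====
-- def get_terminals(grammar, token, mem):
--     stack = [(token, False)]
--     while stack:
--         t, fin = stack.pop()
--         if fin:
--             mem[t] = mem[grammar[t][0]] + mem[grammar[t][1]]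
--         elif grammar[t][0] == t:
--             mem[t] = [t]
--         elif t not in mem:
--             stack.append((t, True))
--             stack.append((grammar[t][1], False))
--             stack.append((grammar[t][0], False))
--     return mem[token]
-- ===== Notes on version B (the rewrite author's own statement) =====
-- stated objective: alternative
-- what changed: Replaces A's memoized recursion with an iterative post-order traversal driven by an explicit stack of (token, finished) frames, performing the same mem mutations and concatenations without Python-level recursion.
import Mathlib
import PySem

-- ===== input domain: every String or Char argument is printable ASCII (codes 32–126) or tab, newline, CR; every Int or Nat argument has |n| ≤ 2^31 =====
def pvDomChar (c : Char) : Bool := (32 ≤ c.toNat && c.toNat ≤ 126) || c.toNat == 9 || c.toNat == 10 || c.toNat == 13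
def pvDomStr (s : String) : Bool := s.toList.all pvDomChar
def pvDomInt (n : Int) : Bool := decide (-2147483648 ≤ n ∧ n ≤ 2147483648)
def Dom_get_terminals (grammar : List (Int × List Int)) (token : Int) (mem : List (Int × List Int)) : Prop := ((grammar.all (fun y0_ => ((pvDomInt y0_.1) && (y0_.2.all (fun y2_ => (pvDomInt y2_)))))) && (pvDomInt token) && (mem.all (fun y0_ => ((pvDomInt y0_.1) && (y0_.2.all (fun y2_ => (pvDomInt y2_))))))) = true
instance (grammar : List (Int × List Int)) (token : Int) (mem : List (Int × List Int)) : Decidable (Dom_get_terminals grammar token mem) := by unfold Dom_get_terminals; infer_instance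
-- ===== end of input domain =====

-- B replaces A's memoized recursion by an iterative explicit-stack post-order traversal; both mutate
-- the Python dict 'mem' identically (the theorems here are about the RETURN value; the ports thread mem).

-- ===== PORT A =====
-- A's recursion threaded with the mutable dict 'mem'; fuel is a totality guard only (Python has none;
-- under Pre_ the fuel grammar.length + 1 is proved sufficient). none = a Python exception (KeyError /
-- IndexError, or unbounded recursion on a cyclic grammar), excluded by Pre_.
def gtACore (g : PySem.Dict Int (List Int)) : Nat → Int → PySem.Dict Int (List Int) →
    Option (List Int × PySem.Dict Int (List Int))
  | 0, _, _ => none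
  | fuel + 1, t, m =>
    match PySem.Dict.get? g t with
    | none => none                                     -- grammar[token] : KeyError
    | some v =>
      match PySem.List.pyGet? v 0 with
      | none => none                                   -- grammar[token][0] : IndexError
      | some h =>
        if h = t then some ([t], PySem.Dict.insert m t [t])
        else
          match PySem.Dict.get? m t with
          | some cached => some (cached, m)            -- token in mem
          | none =>
            match gtACore g fuel h m with
            | none => none
            | some (ls, m1) =>
              match PySem.List.pyGet? v 1 with
              | none => none                           -- grammar[token][1] : IndexError
              | some r =>
                match gtACore g fuel r m1 with
                | none => none
                | some (rs, m2) =>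
                  some (ls ++ rs, PySem.Dict.insert m2 t (ls ++ rs))

def get_terminals (grammar : List (Int × List Int)) (token : Int) (mem : List (Int × List Int)) : List Int :=
  match gtACore (PySem.Dict.ofList grammar) (grammar.length + 1) token (PySem.Dict.ofList mem) with
  | some (s, _) => s
  | none => []

-- ===== PORT B =====
-- B's while-loop over the explicit stack of (token, finished) frames; fuel is a totality guard only
-- (under Pre_ the fuel 2 * 3 ^ (grammar.length + 1) is proved sufficient).
def gtBLoop (g : PySem.Dict Int (List Int)) : Nat → List (Int × Bool) → PySem.Dict Int (List Int) →
    Option (PySem.Dict Int (List Int))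
  | _, [], m => some m
  | 0, _ :: _, _ => none
  | fuel + 1, (t, true) :: st, m =>      -- if fin: the 'finish' frame
      match PySem.Dict.get? g t with
      | none => none
      | some v =>
        match PySem.List.pyGet? v 0, PySem.List.pyGet? v 1 with
        | some l, some r =>
          match PySem.Dict.get? m l, PySem.Dict.get? m r with
          | some ls, some rs => gtBLoop g fuel st (PySem.Dict.insert m t (ls ++ rs))
          | _, _ => none                               -- mem[...] : KeyError
        | _, _ => none
  | fuel + 1, (t, false) :: st, m =>     -- else: the 'visit' frame
      match PySem.Dict.get? g t with
      | none => none
      | some v =>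
        match PySem.List.pyGet? v 0 with
        | none => none
        | some h =>
          if h = t then gtBLoop g fuel st (PySem.Dict.insert m t [t])
          else if (PySem.Dict.get? m t).isSome then gtBLoop g fuel st m
          else
            match PySem.List.pyGet? v 1 with
            | none => none
            | some r => gtBLoop g fuel ((h, false) :: (r, false) :: (t, true) :: st) m

def get_terminals_alt (grammar : List (Int × List Int)) (token : Int) (mem : List (Int × List Int)) : List Int :=
  match gtBLoop (PySem.Dict.ofList grammar) (2 * 3 ^ (grammar.length + 1)) [(token, false)] (PySem.Dict.ofList mem) with
  | some m' => (PySem.Dict.get? m' token).getD []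
  | none => []

-- ===== PRECONDITION & SPEC =====
-- gtSafe g m n t: every expansion path from t reaches a terminal rule or an initially-memoized token
-- within n steps, and every grammar/index lookup on the way succeeds — i.e. A's recursion from t
-- (over the memo m) returns normally.  A path visits distinct non-memoized keys, so n = grammar.length
-- covers every terminating input.
def gtSafe (g : PySem.Dict Int (List Int)) (m : PySem.Dict Int (List Int)) :
    Nat → Int → Bool
  | 0, t =>
    match PySem.Dict.get? g t with
    | none => false
    | some v =>
      match PySem.List.pyGet? v 0 with
      | none => false
      | some h => (h == t) || PySem.Dict.contains m t
  | n + 1, t =>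
    match PySem.Dict.get? g t with
    | none => false
    | some v =>
      match PySem.List.pyGet? v 0 with
      | none => false
      | some h =>
        (h == t) || PySem.Dict.contains m t ||
          (match PySem.List.pyGet? v 1 with
           | none => false
           | some r => gtSafe g m n h && gtSafe g m n r)

-- Pre_ = exactly the inputs on which A returns a value: outside it A raises KeyError (a token with no
-- rule), IndexError (a non-terminal rule with fewer than two entries), or recurses without bound on a
-- cyclic grammar (RecursionError).  Well-foundedness of the expansion relation is inherently an
-- inductive property of the input graph; gtSafe is its standard bounded-depth statement (it computes
-- no output and copies neither port).  (A also hits Python's fixed recursion-depth limit on grammars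
-- whose expansion chains are thousands of keys deep; no bound of that kind is modelled here.)
def Pre_get_terminals (grammar : List (Int × List Int)) (token : Int) (mem : List (Int × List Int)) : Prop :=
  gtSafe (PySem.Dict.ofList grammar) (PySem.Dict.ofList mem) grammar.length token = true

instance (grammar : List (Int × List Int)) (token : Int) (mem : List (Int × List Int)) : Decidable (Pre_get_terminals grammar token mem) := by unfold Pre_get_terminals; infer_instance

def pvWitness_get_terminals : (List (Int × List Int)) × Int × (List (Int × List Int)) :=
  ([(0, [0]), (1, [1]), (2, [0, 1]), (3, [2, 1])], 3, [(7, [9, 9])])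

def Spec_get_terminals (grammar : List (Int × List Int)) (token : Int) (mem : List (Int × List Int)) (out : List Int) : Prop := out = get_terminals_alt grammar token mem
instance (grammar : List (Int × List Int)) (token : Int) (mem : List (Int × List Int)) (out : List Int) : Decidable (Spec_get_terminals grammar token mem out) := by unfold Spec_get_terminals; infer_instance

-- ===== CLAIM (what is proved, stated in full; the proofs are below) =====
def Claim_equal_get_terminals : Prop := ∀ (grammar : List (Int × List Int)) (token : Int) (mem : List (Int × List Int)), Dom_get_terminals grammar token mem → Pre_get_terminals grammar token mem → Spec_get_terminals grammar token mem (get_terminals grammar token mem)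

-- ===== LEMMAS AND PROOFS =====

-- more fuel never changes a successful run of B's loop
theorem gtBLoop_mono (g : PySem.Dict Int (List Int)) (f k : Nat) (st : List (Int × Bool))
    (m x : PySem.Dict Int (List Int)) (h : gtBLoop g f st m = some x) :
    gtBLoop g (f + k) st m = some x := by
  induction f generalizing st m with
  | zero =>
    cases st with
    | nil => simpa [gtBLoop] using h
    | cons p st' => simp [gtBLoop] at h
  | succ f ih =>
    cases st with
    | nil => simpa [gtBLoop] using h
    | cons p st' =>
      obtain ⟨t, fin⟩ := p
      have e : f + 1 + k = (f + k) + 1 := by omega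
      rw [e]
      cases fin with
      | true =>
        simp only [gtBLoop] at h ⊢
        cases hg : PySem.Dict.get? g t <;> simp only [hg] at h ⊢ <;> try exact h
        case some v =>
          cases h0 : PySem.List.pyGet? v 0 <;> cases h1 : PySem.List.pyGet? v 1 <;>
            simp only [h0, h1] at h ⊢ <;> try exact h
          case some.some l r =>
            cases hl : PySem.Dict.get? m l <;> cases hr : PySem.Dict.get? m r <;>
              simp only [hl, hr] at h ⊢ <;> first | exact h | exact ih _ _ h
      | false =>
        simp only [gtBLoop] at h ⊢
        cases hg : PySem.Dict.get? g t <;> simp only [hg] at h ⊢ <;> try exact h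
        case some v =>
          cases h0 : PySem.List.pyGet? v 0 <;> simp only [h0] at h ⊢ <;> try exact h
          case some l =>
            by_cases hlt : l = t
            · simp only [hlt] at h ⊢
              exact ih _ _ h
            · simp only [if_neg hlt] at h ⊢
              by_cases hm : (PySem.Dict.get? m t).isSome
              · simp only [hm, if_true] at h ⊢
                exact ih _ _ h
              · simp only [hm, if_false, Bool.false_eq_true] at h ⊢
                cases h1 : PySem.List.pyGet? v 1 <;> simp only [h1] at h ⊢ <;>
                  first | exact h | exact ih _ _ h

-- a terminal token returns [t]
theorem gtACore_term (g : PySem.Dict Int (List Int)) (fuel : Nat) (t : Int)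
    (m : PySem.Dict Int (List Int)) (s : List Int) (m' : PySem.Dict Int (List Int))
    (h : gtACore g fuel t m = some (s, m'))
    (v : List Int) (hv : PySem.Dict.get? g t = some v) (hterm : PySem.List.pyGet? v 0 = some t) :
    s = [t] := by
  cases fuel with
  | zero => simp [gtACore] at h
  | succ f =>
    simp only [gtACore, hv, hterm] at h
    exact (Prod.mk.injEq _ _ _ _ ▸ (Option.some.injEq _ _ ▸ h)).1.symm

-- A only adds memo entries; an existing entry survives unchanged, except that a terminal key may be
-- (re-)overwritten with its own singleton
theorem gtACore_preserves (g : PySem.Dict Int (List Int)) (fuel : Nat) (t : Int)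
    (m : PySem.Dict Int (List Int)) (s : List Int) (m' : PySem.Dict Int (List Int))
    (h : gtACore g fuel t m = some (s, m')) (k : Int) (v : List Int)
    (hk : PySem.Dict.get? m k = some v) :
    PySem.Dict.get? m' k = some v ∨
      (PySem.Dict.get? m' k = some [k] ∧
        ∃ w, PySem.Dict.get? g k = some w ∧ PySem.List.pyGet? w 0 = some k) := by
  induction fuel generalizing t m s m' v with
  | zero => simp [gtACore] at h
  | succ f ih =>
    simp only [gtACore] at h
    cases hg : PySem.Dict.get? g t with
    | none => simp only [hg] at h; cases h
    | some v0 =>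
    simp only [hg] at h
    cases h0 : PySem.List.pyGet? v0 0 with
    | none => simp only [h0] at h; cases h
    | some hd =>
    simp only [h0] at h
    by_cases hdt : hd = t
    · subst hdt
      rw [if_pos rfl] at h
      simp only [Option.some.injEq, Prod.mk.injEq] at h
      obtain ⟨-, hm'⟩ := h
      subst hm'
      by_cases hkt : k = hd
      · subst hkt
        right
        exact ⟨PySem.Dict.get?_insert_self _ _ _, v0, hg, h0⟩
      · left
        rw [PySem.Dict.get?_insert_of_ne _ _ hkt]
        exact hk
    · simp only [if_neg hdt] at h
      cases hm : PySem.Dict.get? m t with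
      | some cached =>
        simp only [hm] at h
        simp only [Option.some.injEq, Prod.mk.injEq] at h
        obtain ⟨-, hm'⟩ := h
        subst hm'
        exact Or.inl hk
      | none =>
        simp only [hm] at h
        cases hA : gtACore g f hd m with
        | none => simp only [hA] at h; cases h
        | some p1 =>
        simp only [hA] at h
        obtain ⟨ls, m1⟩ := p1
        cases h1 : PySem.List.pyGet? v0 1 with
        | none => simp only [h1] at h; cases h
        | some r =>
        simp only [h1] at h
        cases hB : gtACore g f r m1 with
        | none => simp only [hB] at h; cases h
        | some p2 =>
        simp only [hB] at h
        obtain ⟨rs, m2⟩ := p2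
        simp only [Option.some.injEq, Prod.mk.injEq] at h
        obtain ⟨-, hm'⟩ := h
        subst hm'
        have hkt : k ≠ t := by
          intro hkt; subst hkt; rw [hk] at hm; cases hm
        have step1 := ih hd m ls m1 hA v hk
        have step2 : PySem.Dict.get? m2 k = some v ∨
            (PySem.Dict.get? m2 k = some [k] ∧
              ∃ w, PySem.Dict.get? g k = some w ∧ PySem.List.pyGet? w 0 = some k) := by
          rcases step1 with h1' | ⟨h1', hterm⟩
          · exact ih r m1 rs m2 hB v h1'
          · rcases ih r m1 rs m2 hB [k] h1' with h2' | ⟨h2', -⟩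
            · exact Or.inr ⟨h2', hterm⟩
            · exact Or.inr ⟨h2', hterm⟩
        rw [PySem.Dict.get?_insert_of_ne _ _ hkt]
        exact step2

-- a successful run of A never removes a memo key
theorem gtACore_contains (g : PySem.Dict Int (List Int)) (fuel : Nat) (t : Int)
    (m : PySem.Dict Int (List Int)) (s : List Int) (m' : PySem.Dict Int (List Int))
    (h : gtACore g fuel t m = some (s, m')) (k : Int)
    (hk : PySem.Dict.contains m k = true) : PySem.Dict.contains m' k = true := by
  rw [PySem.Dict.contains_eq_isSome_get?] at hk ⊢
  cases hget : PySem.Dict.get? m k with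
  | none => rw [hget] at hk; cases hk
  | some v =>
    rcases gtACore_preserves g fuel t m s m' h k v hget with h' | ⟨h', -⟩ <;>
      simp [h']

-- gtSafe only looks the memo's keys up: it is monotone under growing the memo
theorem gtSafe_mono_mem (g m m' : PySem.Dict Int (List Int))
    (hmm : ∀ k, PySem.Dict.contains m k = true → PySem.Dict.contains m' k = true) :
    ∀ n t, gtSafe g m n t = true → gtSafe g m' n t = true := by
  intro n
  induction n with
  | zero =>
    intro t h
    simp only [gtSafe] at h ⊢
    cases hg : PySem.Dict.get? g t <;> simp only [hg] at h ⊢ <;> try exact h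
    case some v =>
      cases h0 : PySem.List.pyGet? v 0 <;> simp only [h0] at h ⊢ <;> try exact h
      case some hd =>
        simp only [Bool.or_eq_true] at h ⊢
        rcases h with h | h
        · exact Or.inl h
        · exact Or.inr (hmm t h)
  | succ n ih =>
    intro t h
    simp only [gtSafe] at h ⊢
    cases hg : PySem.Dict.get? g t <;> simp only [hg] at h ⊢ <;> try exact h
    case some v =>
      cases h0 : PySem.List.pyGet? v 0 <;> simp only [h0] at h ⊢ <;> try exact h
      case some hd =>
        simp only [Bool.or_eq_true] at h ⊢
        rcases h with (h | h) | h
        · exact Or.inl (Or.inl h)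
        · exact Or.inl (Or.inr (hmm t h))
        · right
          cases h1 : PySem.List.pyGet? v 1 <;> simp only [h1] at h ⊢ <;> try exact h
          case some r =>
            simp only [Bool.and_eq_true] at h ⊢
            exact ⟨ih hd h.1, ih r h.2⟩

-- on a safe token, A's recursion succeeds with any fuel above the safety depth
theorem gtSafe_suff (g : PySem.Dict Int (List Int)) :
    ∀ (n : Nat) (t : Int) (m : PySem.Dict Int (List Int)) (f : Nat),
      gtSafe g m n t = true → n < f → (gtACore g f t m).isSome := by
  intro n
  induction n with
  | zero =>
    intro t m f h hf
    cases f with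
    | zero => omega
    | succ f' =>
      simp only [gtSafe] at h
      cases hg : PySem.Dict.get? g t <;> simp only [hg] at h <;> try cases h
      case some v =>
      cases h0 : PySem.List.pyGet? v 0 <;> simp only [h0] at h <;> try cases h
      case some hd =>
      simp only [gtACore, hg, h0]
      simp only [Bool.or_eq_true, beq_iff_eq] at h
      by_cases hdt : hd = t
      · rw [if_pos hdt]; exact rfl
      · rw [if_neg hdt]
        have hc : PySem.Dict.contains m t = true := by
          rcases h with h | h
          · exact absurd h hdt
          · exact h
        rw [PySem.Dict.contains_eq_isSome_get?] at hc
        cases hmm : PySem.Dict.get? m t with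
        | none => rw [hmm] at hc; cases hc
        | some cached => exact rfl
  | succ n ih =>
    intro t m f h hf
    cases f with
    | zero => omega
    | succ f' =>
      simp only [gtSafe] at h
      cases hg : PySem.Dict.get? g t <;> simp only [hg] at h <;> try cases h
      case some v =>
      cases h0 : PySem.List.pyGet? v 0 <;> simp only [h0] at h <;> try cases h
      case some hd =>
      simp only [gtACore, hg, h0]
      simp only [Bool.or_eq_true, beq_iff_eq] at h
      by_cases hdt : hd = t
      · rw [if_pos hdt]; exact rfl
      · rw [if_neg hdt]
        cases hmm : PySem.Dict.get? m t with
        | some cached => exact rfl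
        | none =>
          have hrec : (PySem.List.pyGet? v 1).isSome ∧
              (match PySem.List.pyGet? v 1 with
               | none => false
               | some r => gtSafe g m n hd && gtSafe g m n r) = true := by
            rcases h with (h | h) | h
            · exact absurd h hdt
            · rw [PySem.Dict.contains_eq_isSome_get?, hmm] at h; cases h
            · refine ⟨?_, h⟩
              cases h1 : PySem.List.pyGet? v 1 <;> simp only [h1] at h ⊢
              · cases h
              · exact rfl
          obtain ⟨h1s, hsafe⟩ := hrec
          cases h1 : PySem.List.pyGet? v 1 with
          | none => rw [h1] at h1s; cases h1s
          | some r =>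
          simp only [h1, Bool.and_eq_true] at hsafe
          obtain ⟨hsl, hsr⟩ := hsafe
          have hA := ih hd m f' hsl (by omega)
          cases hAe : gtACore g f' hd m with
          | none => rw [hAe] at hA; cases hA
          | some p1 =>
          obtain ⟨ls, m1⟩ := p1
          have hsr1 : gtSafe g m1 n r = true :=
            gtSafe_mono_mem g m m1 (fun k hk => gtACore_contains g f' hd m ls m1 hAe k hk) n r hsr
          have hB := ih r m1 f' hsr1 (by omega)
          cases hBe : gtACore g f' r m1 with
          | none => rw [hBe] at hB; cases hB
          | some p2 =>
          obtain ⟨rs, m2⟩ := p2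
          simp only [hBe]
          exact rfl

-- simulation: one successful run of A's recursion is a bounded block of iterations of B's loop,
-- turning the memo m into A's final memo m' (which stores A's return value at t)
theorem gtSim (g : PySem.Dict Int (List Int)) (fuel : Nat) (t : Int)
    (m : PySem.Dict Int (List Int)) (s : List Int) (m' : PySem.Dict Int (List Int))
    (h : gtACore g fuel t m = some (s, m')) :
    PySem.Dict.get? m' t = some s ∧
      ∃ n ≤ 2 * 3 ^ fuel, ∀ st extra, gtBLoop g (n + extra) ((t, false) :: st) m = gtBLoop g extra st m' := by
  induction fuel generalizing t m s m' with
  | zero => simp [gtACore] at h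
  | succ f ih =>
    have hpow : 1 ≤ 3 ^ f := Nat.one_le_pow _ _ (by omega)
    have hpows : 2 * 3 ^ (f + 1) = 2 * 3 ^ f * 3 := by rw [pow_succ]; ring
    simp only [gtACore] at h
    cases hg : PySem.Dict.get? g t with
    | none => simp only [hg] at h; cases h
    | some v0 =>
    simp only [hg] at h
    cases h0 : PySem.List.pyGet? v0 0 with
    | none => simp only [h0] at h; cases h
    | some hd =>
    simp only [h0] at h
    by_cases hdt : hd = t
    · -- terminal rule: one 'visit' iteration of B
      subst hdt
      rw [if_pos rfl] at h
      simp only [Option.some.injEq, Prod.mk.injEq] at h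
      obtain ⟨hs, hm'⟩ := h
      subst hs; subst hm'
      refine ⟨PySem.Dict.get?_insert_self _ _ _, 1, by omega, ?_⟩
      intro st extra
      have e : 1 + extra = extra + 1 := by omega
      rw [e]
      simp only [gtBLoop, hg, h0, ite_true]
    · rw [if_neg hdt] at h
      cases hm : PySem.Dict.get? m t with
      | some cached =>
        -- memoized: one 'visit' iteration of B
        simp only [hm] at h
        simp only [Option.some.injEq, Prod.mk.injEq] at h
        obtain ⟨hs, hm'⟩ := h
        subst hs; subst hm'
        refine ⟨hm, 1, by omega, ?_⟩
        intro st extra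
        have e : 1 + extra = extra + 1 := by omega
        rw [e]
        simp only [gtBLoop, hg, h0, if_neg hdt, hm, Option.isSome_some, if_true]
      | none =>
        -- expansion: visit t, expand both children, then the 'finish' frame of t
        simp only [hm] at h
        cases hA : gtACore g f hd m with
        | none => simp only [hA] at h; cases h
        | some p1 =>
        simp only [hA] at h
        obtain ⟨ls, m1⟩ := p1
        cases h1 : PySem.List.pyGet? v0 1 with
        | none => simp only [h1] at h; cases h
        | some r =>
        simp only [h1] at h
        cases hB : gtACore g f r m1 with
        | none => simp only [hB] at h; cases h
        | some p2 =>
        simp only [hB] at h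
        obtain ⟨rs, m2⟩ := p2
        simp only [Option.some.injEq, Prod.mk.injEq] at h
        obtain ⟨hs, hm'⟩ := h
        subst hs; subst hm'
        obtain ⟨hget1, n1, hn1, hrun1⟩ := ih hd m ls m1 hA
        obtain ⟨hget2, n2, hn2, hrun2⟩ := ih r m1 rs m2 hB
        have hget1' : PySem.Dict.get? m2 hd = some ls := by
          rcases gtACore_preserves g f r m1 rs m2 hB hd ls hget1 with h' | ⟨h', w, hw, hw0⟩
          · exact h'
          · rw [gtACore_term g f hd m ls m1 hA w hw hw0]
            exact h'
        refine ⟨PySem.Dict.get?_insert_self _ _ _, n1 + n2 + 2, by omega, ?_⟩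
        intro st extra
        have e : n1 + n2 + 2 + extra = (n1 + (n2 + (1 + extra))) + 1 := by omega
        rw [e]
        have step0 : gtBLoop g ((n1 + (n2 + (1 + extra))) + 1) ((t, false) :: st) m =
            gtBLoop g (n1 + (n2 + (1 + extra))) ((hd, false) :: (r, false) :: (t, true) :: st) m := by
          simp only [gtBLoop, hg, h0, if_neg hdt, hm, Option.isSome_none, Bool.false_eq_true,
            if_false, h1]
        rw [step0, hrun1 _ _, hrun2 _ _]
        have e2 : 1 + extra = extra + 1 := by omega
        rw [e2]
        simp only [gtBLoop, hg, h0, h1, hget1', hget2]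

-- ===== VERDICT (by name: the statement is the Claim_ definition above) =====
theorem get_terminals_spec : Claim_equal_get_terminals := by
  intro grammar token mem hdom hpre
  unfold Pre_get_terminals at hpre
  unfold Spec_get_terminals get_terminals get_terminals_alt
  have hsome : (gtACore (PySem.Dict.ofList grammar) (grammar.length + 1) token
      (PySem.Dict.ofList mem)).isSome :=
    gtSafe_suff (PySem.Dict.ofList grammar) grammar.length token (PySem.Dict.ofList mem)
      (grammar.length + 1) hpre (by omega)
  cases hA : gtACore (PySem.Dict.ofList grammar) (grammar.length + 1) token (PySem.Dict.ofList mem) with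
  | none => rw [hA] at hsome; cases hsome
  | some p =>
  obtain ⟨s, m'⟩ := p
  obtain ⟨hget, n, hn, hrun⟩ := gtSim _ _ _ _ _ _ hA
  have hx : gtBLoop (PySem.Dict.ofList grammar) n [(token, false)] (PySem.Dict.ofList mem) = some m' := by
    have h0 := hrun [] 0
    simpa [gtBLoop] using h0
  have hb : gtBLoop (PySem.Dict.ofList grammar) (2 * 3 ^ (grammar.length + 1)) [(token, false)]
      (PySem.Dict.ofList mem) = some m' := by
    have hmono := gtBLoop_mono _ n (2 * 3 ^ (grammar.length + 1) - n) _ _ _ hx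
    have e : n + (2 * 3 ^ (grammar.length + 1) - n) = 2 * 3 ^ (grammar.length + 1) := by omega
    rwa [e] at hmono
  simp only [hb, hget, Option.getD_some]
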